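-- pv_equiv track=rewrite | github.com/Abheelash-Mishra/Competitive-Programming-Repo | Codeforces Contest/Round 970 (Div. 3)/D.py | solve
-- ===== SOURCE A (Python) =====
-- def solve(n, per, white):
--     result = [-1] * n
--     visited = [False] * n
--
--     for i in range(n):
--         if not visited[i]:
--             cycle = []
--             count = 0
--             idx = i
--
--             while not visited[idx]:
--                 visited[idx] = True
--                 cycle.append(idx)
--                 if white[idx] == "0":
--                     count += 1
--                 idx = per[idx] - 1
--
--             for index in cycle:
--                 result[index] = count
--
--     return result
-- ===== SOURCE B (Python) =====
-- def solve(n, per, white):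
--     # For each index independently, walk its own cycle once (at most n steps),
--     # counting whites == "0"; no visited array and no shared state.
--     def cycle_zeros(i):
--         c = 1 if white[i] == "0" else 0
--         j = per[i] - 1
--         for _ in range(n):
--             if j == i:
--                 break
--             if white[j] == "0":
--                 c += 1
--             j = per[j] - 1
--         return c
--     return [cycle_zeros(i) for i in range(n)]
-- ===== Notes on version B (the rewrite author's own statement) =====
-- stated objective: alternative
-- what changed: Replaces A's shared visited array, explicit cycle list and per-cycle assignment pass with an independent bounded walk around the cycle of each index (no mutation, no visited bookkeeping).
-- outside the precondition, e.g. on solve(2, [1, 1], ['0', '1']): A returns [1, 0], B returns [1, 2]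
import Mathlib
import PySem

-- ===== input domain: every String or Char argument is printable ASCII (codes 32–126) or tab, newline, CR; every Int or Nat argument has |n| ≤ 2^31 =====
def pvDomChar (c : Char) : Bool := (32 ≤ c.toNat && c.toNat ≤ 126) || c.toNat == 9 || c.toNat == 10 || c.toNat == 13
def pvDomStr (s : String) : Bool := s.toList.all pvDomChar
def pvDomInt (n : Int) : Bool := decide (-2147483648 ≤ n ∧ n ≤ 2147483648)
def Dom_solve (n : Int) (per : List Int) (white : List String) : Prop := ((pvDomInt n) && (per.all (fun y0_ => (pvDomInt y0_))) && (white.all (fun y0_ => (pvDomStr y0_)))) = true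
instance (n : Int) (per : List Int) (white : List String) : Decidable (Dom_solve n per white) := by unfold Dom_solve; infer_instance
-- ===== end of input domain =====

-- B replaces A's shared visited array, cycle list and per-cycle assignment pass with an
-- independent bounded walk around the cycle of each index (alternative decomposition, not faster).

-- ===== PORT A =====
-- A's inner `while not visited[idx]` loop; the fuel only makes the recursion total
-- (inside Pre_ every iteration marks a previously unvisited cell, so `visited.length + 1`
-- fuel is never exhausted); state: (visited, cycle, count), stepping idx := per[idx]-1.
def solveWalk (per : List Int) (white : List String) (fuel : Nat)
    (visited : List Bool) (cycle : List Int) (count : Int) (idx : Int) :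
    List Bool × List Int × Int :=
  match fuel with
  | 0 => (visited, cycle, count)
  | fuel + 1 =>
    if PySem.List.pyGetD visited idx false = false then
      solveWalk per white fuel (PySem.List.pySetD visited idx true) (cycle ++ [idx])
        (if PySem.List.pyGetD white idx "" = "0" then count + 1 else count)
        (PySem.List.pyGetD per idx 0 - 1)
    else (visited, cycle, count)

def solve (n : Int) (per : List Int) (white : List String) : List Int :=
  (List.foldl
    (fun (st : List Int × List Bool) (i : Int) =>
      if PySem.List.pyGetD st.2 i false = false then
        let w := solveWalk per white (st.2.length + 1) st.2 [] 0 i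
        (w.2.1.foldl (fun r index => PySem.List.pySetD r index w.2.2) st.1, w.1)
      else st)
    (List.replicate n.toNat (-1), List.replicate n.toNat false)
    (PySem.List.pyRange 0 n 1)).1

-- ===== PORT B =====
-- B's inner `for _ in range(n): if j == i: break …` loop: fuel = the range bound n.
def altWalk (per : List Int) (white : List String) (i : Int) (fuel : Nat)
    (c : Int) (j : Int) : Int :=
  match fuel with
  | 0 => c
  | fuel + 1 =>
    if j = i then c
    else altWalk per white i fuel
      (if PySem.List.pyGetD white j "" = "0" then c + 1 else c)
      (PySem.List.pyGetD per j 0 - 1)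

def solve_alt (n : Int) (per : List Int) (white : List String) : List Int :=
  (PySem.List.pyRange 0 n 1).map (fun i =>
    altWalk per white i n.toNat
      (if PySem.List.pyGetD white i "" = "0" then 1 else 0)
      (PySem.List.pyGetD per i 0 - 1))

-- ===== PRECONDITION & SPEC =====
-- Pre_ restricts to the problem's natural domain: per is a permutation of 1..n with
-- n = len(per) = len(white) (plus the degenerate n ≤ 0, where A returns []).  Outside it
-- A's walk behaviour (negative-index wraparound, rho-shaped walks over a non-permutation)
-- is accidental and A may raise IndexError.
def Pre_solve (n : Int) (per : List Int) (white : List String) : Prop :=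
  n ≤ 0 ∨ ((per.length : Int) = n ∧ white.length = per.length ∧ per.Nodup ∧
    ∀ v ∈ per, 1 ≤ v ∧ v ≤ n)
instance (n : Int) (per : List Int) (white : List String) : Decidable (Pre_solve n per white) := by
  unfold Pre_solve; infer_instance

def pvWitness_solve : Int × List Int × List String := (3, [2, 3, 1], ["0", "1", "0"])

def Spec_solve (n : Int) (per : List Int) (white : List String) (out : List Int) : Prop := out = solve_alt n per white
instance (n : Int) (per : List Int) (white : List String) (out : List Int) : Decidable (Spec_solve n per white out) := by unfold Spec_solve; infer_instance

-- ===== CLAIM (what is proved, stated in full; the proofs are below) =====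
def Claim_equal_solve : Prop := ∀ (n : Int) (per : List Int) (white : List String), Dom_solve n per white → Pre_solve n per white → Spec_solve n per white (solve n per white)

-- ===== LEMMAS AND PROOFS =====

-- the successor function of the walk, on Nat indices: i ↦ per[i] - 1
def pf (per : List Int) (i : Nat) : Nat := (per.getD i 0 - 1).toNat

-- j is reachable from i by iterating pf
def Reach (per : List Int) (i j : Nat) : Prop := ∃ m : Nat, (pf per)^[m] i = j

-- bounded (decidable) reachability
def ReachB (per : List Int) (i j : Nat) : Bool :=
  (List.range per.length).any (fun m => (pf per)^[m] i == j)

-- the common value: number of indices in i's cycle whose white entry is "0"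
def Zc (per : List Int) (white : List String) (i : Nat) : Int :=
  ((List.range per.length).countP
    (fun j => ReachB per i j && (white.getD j "" == "0")) : Nat)

theorem pf_lt (per : List Int) (n : Int) (hlen : (per.length : Int) = n)
    (hval : ∀ v ∈ per, 1 ≤ v ∧ v ≤ n) (i : Nat) (hi : i < per.length) :
    pf per i < per.length := by
  have hmem : per.getD i 0 ∈ per := by rw [List.getD_eq_getElem per 0 hi]; exact List.getElem_mem hi
  have := hval _ hmem
  unfold pf
  omega

theorem pf_inj (per : List Int) (n : Int) (hnd : per.Nodup)
    (hval : ∀ v ∈ per, 1 ≤ v ∧ v ≤ n) (i j : Nat)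
    (hi : i < per.length) (hj : j < per.length) (h : pf per i = pf per j) : i = j := by
  have hmi : per.getD i 0 ∈ per := by rw [List.getD_eq_getElem per 0 hi]; exact List.getElem_mem hi
  have hmj : per.getD j 0 ∈ per := by rw [List.getD_eq_getElem per 0 hj]; exact List.getElem_mem hj
  have h1 := hval _ hmi
  have h2 := hval _ hmj
  have heq : per.getD i 0 = per.getD j 0 := by unfold pf at h; omega
  have : per[i] = per[j] := by
    rwa [List.getD_eq_getElem per 0 hi, List.getD_eq_getElem per 0 hj] at heq
  exact (List.Nodup.getElem_inj_iff hnd).mp this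

theorem iter_lt (per : List Int) (n : Int) (hlen : (per.length : Int) = n)
    (hval : ∀ v ∈ per, 1 ≤ v ∧ v ≤ n) (i : Nat) (hi : i < per.length) (m : Nat) :
    (pf per)^[m] i < per.length := by
  induction m with
  | zero => simpa using hi
  | succ m ih =>
    rw [Function.iterate_succ_apply']
    exact pf_lt per n hlen hval _ ih

theorem iter_cancel (per : List Int) (n : Int) (hlen : (per.length : Int) = n)
    (hnd : per.Nodup) (hval : ∀ v ∈ per, 1 ≤ v ∧ v ≤ n)
    (a : Nat) (x y : Nat) (hx : x < per.length) (hy : y < per.length)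
    (h : (pf per)^[a] x = (pf per)^[a] y) : x = y := by
  induction a generalizing x y with
  | zero => simpa using h
  | succ a ih =>
    rw [Function.iterate_succ_apply', Function.iterate_succ_apply'] at h
    have := pf_inj per n hnd hval _ _
      (iter_lt per n hlen hval x hx a) (iter_lt per n hlen hval y hy a) h
    exact ih x y hx hy this

theorem period_exists (per : List Int) (n : Int) (hlen : (per.length : Int) = n)
    (hnd : per.Nodup) (hval : ∀ v ∈ per, 1 ≤ v ∧ v ≤ n)
    (i : Nat) (hi : i < per.length) :
    ∃ k : Nat, (0 < k ∧ k ≤ per.length) ∧ (pf per)^[k] i = i := by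
  have hmaps : Set.MapsTo (fun m => (pf per)^[m] i)
      (↑(Finset.range (per.length + 1))) (↑(Finset.range per.length)) := by
    intro a _
    simpa using iter_lt per n hlen hval i hi a
  obtain ⟨a, _, b, _, hab, heq⟩ :=
    Finset.exists_ne_map_eq_of_card_lt_of_maps_to
      (by simp) hmaps
  simp only [Finset.mem_range] at *
  -- wlog a < b
  rcases Nat.lt_or_ge a b with hlt | hge
  · refine ⟨b - a, ⟨by omega, by omega⟩, ?_⟩
    apply iter_cancel per n hlen hnd hval a _ _
      (iter_lt per n hlen hval i hi _) hi
    rw [← Function.iterate_add_apply]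
    have : a + (b - a) = b := by omega
    rw [this]; exact heq.symm
  · have hlt : b < a := by omega
    refine ⟨a - b, ⟨by omega, by omega⟩, ?_⟩
    apply iter_cancel per n hlen hnd hval b _ _
      (iter_lt per n hlen hval i hi _) hi
    rw [← Function.iterate_add_apply]
    have : b + (a - b) = a := by omega
    rw [this]; exact heq

theorem iter_mod (per : List Int) (i : Nat) (L : Nat) (hfix : (pf per)^[L] i = i)
    (hL0 : 0 < L) (m : Nat) : (pf per)^[m] i = (pf per)^[m % L] i := by
  have hmul : ∀ q : Nat, (pf per)^[L * q] i = i := by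
    intro q
    induction q with
    | zero => simp
    | succ q ih =>
      have : L * (q + 1) = L * q + L := by ring
      rw [this, Function.iterate_add_apply, hfix, ih]
  conv_lhs => rw [show m = m % L + L * (m / L) from (Nat.mod_add_div m L).symm]
  rw [Function.iterate_add_apply, hmul]

theorem reach_iff_lt (per : List Int) (n : Int) (hlen : (per.length : Int) = n)
    (hnd : per.Nodup) (hval : ∀ v ∈ per, 1 ≤ v ∧ v ≤ n)
    (i : Nat) (hi : i < per.length) (L : Nat) (hL0 : 0 < L) (hLle : L ≤ per.length)
    (hfix : (pf per)^[L] i = i) (j : Nat) :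
    Reach per i j ↔ ∃ t : Nat, t < L ∧ (pf per)^[t] i = j := by
  constructor
  · rintro ⟨m, rfl⟩
    exact ⟨m % L, Nat.mod_lt _ hL0, (iter_mod per i L hfix hL0 m).symm⟩
  · rintro ⟨t, _, rfl⟩
    exact ⟨t, rfl⟩

theorem reachB_iff (per : List Int) (n : Int) (hlen : (per.length : Int) = n)
    (hnd : per.Nodup) (hval : ∀ v ∈ per, 1 ≤ v ∧ v ≤ n)
    (i : Nat) (hi : i < per.length) (j : Nat) :
    ReachB per i j = true ↔ Reach per i j := by
  obtain ⟨L, ⟨hL0, hLle⟩, hfix⟩ := period_exists per n hlen hnd hval i hi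
  unfold ReachB
  simp only [List.any_eq_true, List.mem_range, beq_iff_eq]
  rw [reach_iff_lt per n hlen hnd hval i hi L hL0 hLle hfix j]
  constructor
  · rintro ⟨m, hm, rfl⟩
    exact ⟨m % L, Nat.mod_lt _ hL0, (iter_mod per i L hfix hL0 m).symm⟩
  · rintro ⟨t, ht, rfl⟩
    exact ⟨t, by omega, rfl⟩

theorem reach_symm (per : List Int) (n : Int) (hlen : (per.length : Int) = n)
    (hnd : per.Nodup) (hval : ∀ v ∈ per, 1 ≤ v ∧ v ≤ n)
    (i j : Nat) (hi : i < per.length) (h : Reach per i j) : Reach per j i := by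
  obtain ⟨L, ⟨hL0, hLle⟩, hfix⟩ := period_exists per n hlen hnd hval i hi
  obtain ⟨m, rfl⟩ := h
  have hmul : ∀ q : Nat, (pf per)^[L * q] i = i := by
    intro q
    induction q with
    | zero => simp
    | succ q ih =>
      have : L * (q + 1) = L * q + L := by ring
      rw [this, Function.iterate_add_apply, hfix, ih]
  refine ⟨L * m - m, ?_⟩
  rw [← Function.iterate_add_apply]
  have hle : m ≤ L * m := Nat.le_mul_of_pos_left m hL0
  rw [show L * m - m + m = L * m by omega]
  exact hmul m

theorem Zc_congr (per : List Int) (white : List String) (n : Int)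
    (hlen : (per.length : Int) = n) (hnd : per.Nodup)
    (hval : ∀ v ∈ per, 1 ≤ v ∧ v ≤ n) (i x : Nat) (hi : i < per.length)
    (h : Reach per i x) : Zc per white x = Zc per white i := by
  have hx : x < per.length := by
    obtain ⟨m, rfl⟩ := h
    exact iter_lt per n hlen hval i hi m
  unfold Zc
  congr 1
  apply List.countP_congr
  intro j hj
  simp only [Bool.and_eq_true]
  constructor
  · rintro ⟨hr, hz⟩
    refine ⟨?_, hz⟩
    rw [reachB_iff per n hlen hnd hval i hi j]
    rw [reachB_iff per n hlen hnd hval x hx j] at hr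
    obtain ⟨m1, rfl⟩ := h
    obtain ⟨m2, rfl⟩ := hr
    exact ⟨m1 + m2, by rw [Nat.add_comm, Function.iterate_add_apply]⟩
  · rintro ⟨hr, hz⟩
    refine ⟨?_, hz⟩
    rw [reachB_iff per n hlen hnd hval x hx j]
    rw [reachB_iff per n hlen hnd hval i hi j] at hr
    have hxi : Reach per x i := reach_symm per n hlen hnd hval i x hi h
    obtain ⟨m1, rfl⟩ := hr
    obtain ⟨m2, hm2⟩ := hxi
    exact ⟨m1 + m2, by rw [Function.iterate_add_apply, hm2]⟩

theorem orbit_distinct (per : List Int) (n : Int) (hlen : (per.length : Int) = n)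
    (hnd : per.Nodup) (hval : ∀ v ∈ per, 1 ≤ v ∧ v ≤ n)
    (s : Nat) (hs : s < per.length) (L : Nat)
    (hmin : ∀ t : Nat, 0 < t → t < L → (pf per)^[t] s ≠ s)
    (a b : Nat) (hab : a < b) (hb : b < L) :
    (pf per)^[a] s ≠ (pf per)^[b] s := by
  intro heq
  have : (pf per)^[b - a] s = s := by
    apply iter_cancel per n hlen hnd hval a _ _
      (iter_lt per n hlen hval s hs _) hs
    rw [← Function.iterate_add_apply]
    have : a + (b - a) = b := by omega
    rw [this]; exact heq.symm
  exact hmin (b - a) (by omega) (by omega) this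

-- count over the explicit orbit list equals the canonical count Zc
theorem orbit_count (per : List Int) (white : List String) (n : Int)
    (hlen : (per.length : Int) = n) (hnd : per.Nodup)
    (hval : ∀ v ∈ per, 1 ≤ v ∧ v ≤ n) (s : Nat) (hs : s < per.length)
    (L : Nat) (hL0 : 0 < L) (hLle : L ≤ per.length) (hfix : (pf per)^[L] s = s)
    (hmin : ∀ t : Nat, 0 < t → t < L → (pf per)^[t] s ≠ s) :
    ((List.range L).countP (fun t => white.getD ((pf per)^[t] s) "" == "0") : Int)
      = Zc per white s := by
  unfold Zc
  congr 1
  have h1 : (List.range L).countP (fun t => white.getD ((pf per)^[t] s) "" == "0")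
      = ((List.range L).map (fun t => (pf per)^[t] s)).countP
          (fun j => white.getD j "" == "0") := by
    rw [List.countP_map]; rfl
  rw [h1]
  have h2 : (List.range per.length).countP
      (fun j => ReachB per s j && (white.getD j "" == "0"))
      = ((List.range per.length).filter (fun j => ReachB per s j)).countP
          (fun j => white.getD j "" == "0") := by
    rw [List.countP_filter]
    apply List.countP_congr
    intro j _
    simp [Bool.and_comm]
  rw [h2]
  apply List.Perm.countP_eq
  rw [List.perm_ext_iff_of_nodup]
  · intro x
    simp only [List.mem_map, List.mem_range, List.mem_filter]
    constructor
    · rintro ⟨t, ht, rfl⟩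
      refine ⟨iter_lt per n hlen hval s hs t, ?_⟩
      rw [reachB_iff per n hlen hnd hval s hs]
      exact ⟨t, rfl⟩
    · rintro ⟨hx, hr⟩
      rw [reachB_iff per n hlen hnd hval s hs] at hr
      rw [reach_iff_lt per n hlen hnd hval s hs L hL0 hLle hfix] at hr
      obtain ⟨t, ht, rfl⟩ := hr
      exact ⟨t, ht, rfl⟩
  · apply List.Nodup.map_on
    · intro a ha b hb hfab
      simp only [List.mem_range] at ha hb
      by_contra hne
      rcases Nat.lt_or_ge a b with hlt | hge
      · exact orbit_distinct per n hlen hnd hval s hs L hmin a b hlt hb hfab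
      · exact orbit_distinct per n hlen hnd hval s hs L hmin b a (by omega) ha hfab.symm
    · exact List.nodup_range
  · exact (List.nodup_range).filter _



-- Python's `per[j] - 1` (j a valid Nat index) is the Int cast of the Nat successor pf
theorem step_cast (per : List Int) (n : Int) (hval : ∀ v ∈ per, 1 ≤ v ∧ v ≤ n)
    (j : Nat) (hj : j < per.length) :
    PySem.List.pyGetD per (j : Int) 0 - 1 = ((pf per j : Nat) : Int) := by
  have hmem : per.getD j 0 ∈ per := by
    rw [List.getD_eq_getElem per 0 hj]; exact List.getElem_mem hj
  have := hval _ hmem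
  rw [PySem.List.pyGetD_natCast]
  unfold pf
  omega

theorem altWalk_spec (per : List Int) (white : List String) (n : Int)
    (hlen : (per.length : Int) = n) (hnd : per.Nodup)
    (hval : ∀ v ∈ per, 1 ≤ v ∧ v ≤ n) (i : Nat) (hi : i < per.length)
    (L : Nat) (hL0 : 0 < L) (hLle : L ≤ per.length) (hfix : (pf per)^[L] i = i)
    (hmin : ∀ t : Nat, 0 < t → t < L → (pf per)^[t] i ≠ i) :
    ∀ (fuel m : Nat), 1 ≤ m → m ≤ L → L - m < fuel →
    ∀ (c : Int),
      c = ((List.range m).countP (fun t => white.getD ((pf per)^[t] i) "" == "0") : Nat) →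
      altWalk per white (i : Int) fuel c (((pf per)^[m] i : Nat) : Int)
        = ((List.range L).countP (fun t => white.getD ((pf per)^[t] i) "" == "0") : Nat) := by
  intro fuel
  induction fuel with
  | zero => intro m _ _ hf; omega
  | succ fuel ih =>
    intro m hm1 hmL hf c hc
    unfold altWalk
    by_cases hml : m = L
    · subst hml
      rw [hfix]
      simp [hc]
    · have hmlt : m < L := by omega
      have hne : (pf per)^[m] i ≠ i := hmin m (by omega) hmlt
      have hne' : (((pf per)^[m] i : Nat) : Int) ≠ (i : Int) := by
        simpa [Int.natCast_inj] using hne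
      rw [if_neg hne']
      have hstep : PySem.List.pyGetD per (((pf per)^[m] i : Nat) : Int) 0 - 1
          = (((pf per)^[m + 1] i : Nat) : Int) := by
        rw [step_cast per n hval _ (iter_lt per n hlen hval i hi m),
          Function.iterate_succ_apply']
      rw [hstep]
      apply ih (m + 1) (by omega) (by omega) (by omega)
      rw [PySem.List.pyGetD_natCast]
      rw [List.range_succ, List.countP_append, List.countP_singleton]
      simp only [beq_iff_eq]
      split_ifs with h
      · simp [hc]
      · simp [hc]

theorem solve_alt_eq (per : List Int) (white : List String) (n : Int)
    (hlen : (per.length : Int) = n) (hnd : per.Nodup)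
    (hval : ∀ v ∈ per, 1 ≤ v ∧ v ≤ n) :
    solve_alt n per white = (List.range per.length).map (fun i => Zc per white i) := by
  have hN : n.toNat = per.length := by omega
  unfold solve_alt
  rw [← hlen, Int.toNat_natCast, PySem.List.pyRange_zero_natCast, List.map_map]
  apply List.map_congr_left
  intro i hiR
  have hi : i < per.length := List.mem_range.mp hiR
  simp only [Function.comp]
  obtain ⟨k, ⟨hk0, hkle⟩, hkfix⟩ := period_exists per n hlen hnd hval i hi
  have hex : ∃ t : Nat, 0 < t ∧ (pf per)^[t] i = i := ⟨k, hk0, hkfix⟩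
  set L := Nat.find hex with hLdef
  have hLspec := Nat.find_spec hex
  have hL0 : 0 < L := hLspec.1
  have hfix : (pf per)^[L] i = i := hLspec.2
  have hLle : L ≤ per.length := le_trans (Nat.find_min' hex ⟨hk0, hkfix⟩) hkle
  have hmin : ∀ t : Nat, 0 < t → t < L → (pf per)^[t] i ≠ i := by
    intro t ht0 htL habs
    exact (Nat.find_min hex htL) ⟨ht0, habs⟩
  have hinit : PySem.List.pyGetD per (i : Int) 0 - 1 = (((pf per)^[1] i : Nat) : Int) := by
    rw [step_cast per n hval i hi, Function.iterate_one]
  rw [hinit]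
  have := altWalk_spec per white n hlen hnd hval i hi L hL0 hLle hfix hmin
    per.length 1 le_rfl hL0 (by omega)
    (if PySem.List.pyGetD white (i : Int) "" = "0" then 1 else 0)
    (by
      rw [PySem.List.pyGetD_natCast]
      simp only [List.range_one, List.countP_singleton, Function.iterate_zero_apply,
        beq_iff_eq]
      split_ifs <;> simp)
  rw [this]
  exact orbit_count per white n hlen hnd hval i hi L hL0 hLle hfix hmin

-- A's inner while-loop: starting at a fresh index s, it visits exactly the orbit of s
theorem solveWalk_spec (per : List Int) (white : List String) (n : Int)
    (hlen : (per.length : Int) = n) (hnd : per.Nodup)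
    (hval : ∀ v ∈ per, 1 ≤ v ∧ v ≤ n) (s : Nat) (hs : s < per.length)
    (L : Nat) (hL0 : 0 < L) (hLle : L ≤ per.length) (hfix : (pf per)^[L] s = s)
    (hmin : ∀ t : Nat, 0 < t → t < L → (pf per)^[t] s ≠ s)
    (visited0 : List Bool)
    (hfresh : ∀ x : Nat, Reach per s x → visited0.getD x false = false) :
    ∀ (fuel m : Nat), m ≤ L → L - m < fuel →
    ∀ (visited : List Bool) (cycle : List Int) (count : Int),
      visited.length = per.length →
      (∀ j : Nat, j < per.length →
        visited.getD j false
          = (visited0.getD j false || decide (∃ t : Nat, t < m ∧ (pf per)^[t] s = j))) →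
      cycle = (List.range m).map (fun t => (((pf per)^[t] s : Nat) : Int)) →
      count = ((List.range m).countP (fun t => white.getD ((pf per)^[t] s) "" == "0") : Nat) →
      ∃ V : List Bool,
        solveWalk per white fuel visited cycle count (((pf per)^[m] s : Nat) : Int)
          = (V, (List.range L).map (fun t => (((pf per)^[t] s : Nat) : Int)),
              ((((List.range L).countP
                  (fun t => white.getD ((pf per)^[t] s) "" == "0") : Nat) : Int)))
        ∧ V.length = per.length
        ∧ ∀ j : Nat, j < per.length →
            V.getD j false = (visited0.getD j false || ReachB per s j) := by
  intro fuel
  induction fuel with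
  | zero => intro m _ hf; omega
  | succ fuel ih =>
    intro m hmL hf visited cycle count hvlen hvchar hcyc hcount
    unfold solveWalk
    have hx : (pf per)^[m] s < per.length := iter_lt per n hlen hval s hs m
    have htest : PySem.List.pyGetD visited (((pf per)^[m] s : Nat) : Int) false
        = (visited0.getD ((pf per)^[m] s) false
            || decide (∃ t : Nat, t < m ∧ (pf per)^[t] s = (pf per)^[m] s)) := by
      rw [PySem.List.pyGetD_natCast]; exact hvchar _ hx
    by_cases hml : m = L
    · have hmem : ∃ t : Nat, t < m ∧ (pf per)^[t] s = (pf per)^[m] s :=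
        ⟨0, by omega, by simp [hml, hfix]⟩
      rw [if_neg (by rw [htest]; simp [hmem])]
      refine ⟨visited, by rw [hcyc, hcount, hml], hvlen, ?_⟩
      intro j hj
      rw [hvchar j hj, hml]
      congr 1
      rw [Bool.eq_iff_iff]
      simp only [decide_eq_true_eq]
      rw [← reach_iff_lt per n hlen hnd hval s hs L hL0 hLle hfix j,
        reachB_iff per n hlen hnd hval s hs j]
    · have hmlt : m < L := by omega
      have hviss : visited0.getD ((pf per)^[m] s) false = false :=
        hfresh _ ⟨m, rfl⟩
      have hnew : ¬ ∃ t : Nat, t < m ∧ (pf per)^[t] s = (pf per)^[m] s := by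
        rintro ⟨t, htm, habs⟩
        exact orbit_distinct per n hlen hnd hval s hs L hmin t m htm hmlt habs
      rw [if_pos (by rw [htest, hviss]; simp [hnew])]
      have hstep : PySem.List.pyGetD per (((pf per)^[m] s : Nat) : Int) 0 - 1
          = (((pf per)^[m + 1] s : Nat) : Int) := by
        rw [step_cast per n hval _ hx, Function.iterate_succ_apply']
      rw [hstep]
      apply ih (m + 1) (by omega) (by omega)
      · rw [PySem.List.length_pySetD]; exact hvlen
      · intro j hj
        rw [← PySem.List.pyGetD_natCast (PySem.List.pySetD visited (((pf per)^[m] s : Nat) : Int) true) j false,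
          PySem.List.pyGetD_pySetD_natCast _ _ _ _ _ (by rw [hvlen]; exact hx),
          PySem.List.pyGetD_natCast]
        by_cases hje : j = (pf per)^[m] s
        · subst hje
          simp
          exact Or.inr ⟨m, le_rfl, rfl⟩
        · rw [if_neg hje, hvchar j hj]
          congr 1
          rw [Bool.eq_iff_iff]
          simp only [decide_eq_true_eq]
          constructor
          · rintro ⟨t, htm, rfl⟩; exact ⟨t, by omega, rfl⟩
          · rintro ⟨t, htm, rfl⟩
            refine ⟨t, ?_, rfl⟩
            have htne : t ≠ m := fun he => hje (by rw [he])
            omega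
      · rw [hcyc, List.range_succ, List.map_append]; rfl
      · rw [PySem.List.pyGetD_natCast]
        rw [List.range_succ, List.countP_append, List.countP_singleton]
        simp only [beq_iff_eq]
        split_ifs with h
        · simp [hcount]
        · simp [hcount]

-- the minimal period of an index under pf
theorem min_period (per : List Int) (n : Int) (hlen : (per.length : Int) = n)
    (hnd : per.Nodup) (hval : ∀ v ∈ per, 1 ≤ v ∧ v ≤ n)
    (i : Nat) (hi : i < per.length) :
    ∃ L : Nat, (0 < L ∧ L ≤ per.length) ∧ (pf per)^[L] i = i ∧
      ∀ t : Nat, 0 < t → t < L → (pf per)^[t] i ≠ i := by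
  obtain ⟨k, ⟨hk0, hkle⟩, hkfix⟩ := period_exists per n hlen hnd hval i hi
  have hex : ∃ t : Nat, 0 < t ∧ (pf per)^[t] i = i := ⟨k, hk0, hkfix⟩
  refine ⟨Nat.find hex, ⟨(Nat.find_spec hex).1,
    le_trans (Nat.find_min' hex ⟨hk0, hkfix⟩) hkle⟩, (Nat.find_spec hex).2, ?_⟩
  intro t ht0 htL habs
  exact Nat.find_min hex htL ⟨ht0, habs⟩

-- "some i < k reaches j", as a Bool
def VisB (per : List Int) (k j : Nat) : Bool :=
  (List.range k).any (fun i => ReachB per i j)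

theorem visB_succ (per : List Int) (k j : Nat) :
    VisB per (k + 1) j = (VisB per k j || ReachB per k j) := by
  unfold VisB
  rw [List.range_succ, List.any_append]
  simp

theorem visB_iff (per : List Int) (n : Int) (hlen : (per.length : Int) = n)
    (hnd : per.Nodup) (hval : ∀ v ∈ per, 1 ≤ v ∧ v ≤ n)
    (k : Nat) (hk : k ≤ per.length) (j : Nat) :
    VisB per k j = true ↔ ∃ i : Nat, i < k ∧ Reach per i j := by
  unfold VisB
  simp only [List.any_eq_true, List.mem_range]
  constructor
  · rintro ⟨i, hik, hr⟩
    exact ⟨i, hik, (reachB_iff per n hlen hnd hval i (by omega) j).mp hr⟩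
  · rintro ⟨i, hik, hr⟩
    exact ⟨i, hik, (reachB_iff per n hlen hnd hval i (by omega) j).mpr hr⟩

-- A's `for index in cycle: result[index] = count` pass
theorem foldl_set_char (v : Int) : ∀ (xs : List Nat) (r : List Int),
    (∀ x ∈ xs, x < r.length) →
    (List.foldl (fun r (index : Int) => PySem.List.pySetD r index v)
        r (xs.map (fun (x : Nat) => (x : Int)))).length = r.length ∧
    ∀ j : Nat, j < r.length →
      (List.foldl (fun r (index : Int) => PySem.List.pySetD r index v)
          r (xs.map (fun (x : Nat) => (x : Int)))).getD j 0
        = if j ∈ xs then v else r.getD j 0 := by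
  intro xs
  induction xs with
  | nil => intro r _; exact ⟨rfl, fun j hj => by simp⟩
  | cons x xs ih =>
    intro r hmem
    simp only [List.map_cons, List.foldl_cons, PySem.List.pySetD_natCast]
    have hxr : x < r.length := hmem x (List.mem_cons_self)
    have hlen' : (r.set x v).length = r.length := by simp
    obtain ⟨ihlen, ihchar⟩ := ih (r.set x v)
      (by intro y hy; rw [hlen']; exact hmem y (List.mem_cons_of_mem _ hy))
    refine ⟨by rw [ihlen, hlen'], ?_⟩
    intro j hj
    rw [ihchar j (by rw [hlen']; exact hj)]
    by_cases hjx : j ∈ xs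
    · simp [hjx]
    · simp only [if_neg hjx]
      rw [List.getD_eq_getElem?_getD, List.getElem?_set, List.getD_eq_getElem?_getD]
      by_cases hje : j = x
      · subst hje
        simp [hj]
      · simp [Ne.symm hje, hje, hjx]

-- the body of A's outer loop, named for the proofs (definitionally the lambda in `solve`)
def stepA (per : List Int) (white : List String) (st : List Int × List Bool) (i : Int) :
    List Int × List Bool :=
  if PySem.List.pyGetD st.2 i false = false then
    let w := solveWalk per white (st.2.length + 1) st.2 [] 0 i
    (w.2.1.foldl (fun r index => PySem.List.pySetD r index w.2.2) st.1, w.1)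
  else st

theorem solve_eq_foldl (n : Int) (per : List Int) (white : List String) :
    solve n per white
      = (List.foldl (stepA per white)
          (List.replicate n.toNat (-1), List.replicate n.toNat false)
          (PySem.List.pyRange 0 n 1)).1 := rfl

theorem solve_eq (per : List Int) (white : List String) (n : Int)
    (hlen : (per.length : Int) = n) (hnd : per.Nodup)
    (hval : ∀ v ∈ per, 1 ≤ v ∧ v ≤ n) :
    solve n per white = (List.range per.length).map (fun j => Zc per white j) := by
  have key : ∀ k : Nat, k ≤ per.length → ∃ st : List Int × List Bool,
      List.foldl (stepA per white)
          (List.replicate per.length (-1), List.replicate per.length false)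
          ((List.range k).map (fun (i : Nat) => (i : Int))) = st
      ∧ st.1.length = per.length ∧ st.2.length = per.length
      ∧ (∀ j : Nat, j < per.length → st.2.getD j false = VisB per k j)
      ∧ (∀ j : Nat, j < per.length →
          st.1.getD j 0 = if VisB per k j then Zc per white j else -1) := by
    intro k
    induction k with
    | zero =>
      intro _
      refine ⟨_, rfl, by simp, by simp, ?_, ?_⟩
      · intro j hj
        simp [VisB, List.getD_eq_getElem?_getD, hj]
      · intro j hj
        simp [VisB, List.getD_eq_getElem?_getD, hj]
    | succ k ih =>
      intro hk1
      obtain ⟨st, hfold, hl1, hl2, hvis, hres⟩ := ih (by omega)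
      have hkN : k < per.length := by omega
      rw [List.range_succ, List.map_append, List.foldl_append, hfold]
      simp only [List.map_cons, List.map_nil, List.foldl_cons, List.foldl_nil]
      have htest : PySem.List.pyGetD st.2 (k : Int) false = VisB per k k := by
        rw [PySem.List.pyGetD_natCast]; exact hvis k hkN
      by_cases hv : VisB per k k = true
      · -- k already visited: the step is a no-op and VisB (k+1) = VisB k
        have hstep : ∀ j : Nat, j < per.length → VisB per (k + 1) j = VisB per k j := by
          intro j hj
          rw [visB_succ, Bool.eq_iff_iff]
          simp only [Bool.or_eq_true]
          constructor
          · rintro (h | h)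
            · exact h
            · obtain ⟨i0, hi0k, hr0⟩ :=
                (visB_iff per n hlen hnd hval k (by omega) k).mp hv
              have hkj : Reach per k j :=
                (reachB_iff per n hlen hnd hval k hkN j).mp h
              refine (visB_iff per n hlen hnd hval k (by omega) j).mpr ⟨i0, hi0k, ?_⟩
              obtain ⟨m1, rfl⟩ := hkj
              obtain ⟨m2, hm2⟩ := hr0
              exact ⟨m1 + m2, by rw [Function.iterate_add_apply, hm2]⟩
          · exact Or.inl
        have hnoop : stepA per white st (k : Int) = st := by
          unfold stepA
          rw [htest, hv]
          simp
        rw [hnoop]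
        refine ⟨st, rfl, hl1, hl2, ?_, ?_⟩
        · intro j hj
          rw [hvis j hj, ← hstep j hj]
        · intro j hj
          rw [hres j hj, hstep j hj]
      · -- k fresh: the walk marks exactly k's cycle and writes its count
        have hvfalse : VisB per k k = false := by
          simpa using hv
        obtain ⟨L, ⟨hL0, hLle⟩, hfix, hmin⟩ := min_period per n hlen hnd hval k hkN
        have hfresh : ∀ x : Nat, Reach per k x → st.2.getD x false = false := by
          intro x hrx
          have hxN : x < per.length := by
            obtain ⟨m, rfl⟩ := hrx
            exact iter_lt per n hlen hval k hkN m
          rw [hvis x hxN]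
          by_contra habs
          have hvx : VisB per k x = true := by simpa using habs
          obtain ⟨i0, hi0, hr0⟩ := (visB_iff per n hlen hnd hval k (by omega) x).mp hvx
          have hxk : Reach per x k := reach_symm per n hlen hnd hval k x hkN hrx
          have hik : Reach per i0 k := by
            obtain ⟨m1, rfl⟩ := hr0
            obtain ⟨m2, hm2⟩ := hxk
            exact ⟨m2 + m1, by rw [Function.iterate_add_apply, hm2]⟩
          have : VisB per k k = true :=
            (visB_iff per n hlen hnd hval k (by omega) k).mpr ⟨i0, hi0, hik⟩
          rw [hvfalse] at this
          exact Bool.false_ne_true this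
        obtain ⟨V, hwalk, hVlen, hVchar⟩ :=
          solveWalk_spec per white n hlen hnd hval k hkN L hL0 hLle hfix hmin
            st.2 hfresh (st.2.length + 1) 0 (by omega) (by rw [hl2]; omega)
            st.2 [] 0 hl2 (by intro j hj; simp) (by simp) (by simp)
        have hwalk' : solveWalk per white (st.2.length + 1) st.2 [] 0 (k : Int)
            = (V, (List.range L).map (fun t => (((pf per)^[t] k : Nat) : Int)),
                ((((List.range L).countP
                    (fun t => white.getD ((pf per)^[t] k) "" == "0") : Nat) : Int))) := by
          rw [show ((k : Nat) : Int) = (((pf per)^[0] k : Nat) : Int) by simp]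
          exact hwalk
        have hFst : stepA per white st (k : Int)
            = ((((List.range L).map (fun t => (pf per)^[t] k)).map
                  (fun (x : Nat) => (x : Int))).foldl
                (fun r index => PySem.List.pySetD r index
                  ((((List.range L).countP
                      (fun t => white.getD ((pf per)^[t] k) "" == "0") : Nat) : Int)))
                st.1, V) := by
          unfold stepA
          rw [htest, hvfalse, if_pos rfl, hwalk', List.map_map]
          rfl
        rw [hFst]
        set cnt : Int := (((List.range L).countP
            (fun t => white.getD ((pf per)^[t] k) "" == "0") : Nat) : Int) with hcnt
        have hcntZ : cnt = Zc per white k :=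
          orbit_count per white n hlen hnd hval k hkN L hL0 hLle hfix hmin
        have hmemxs : ∀ x ∈ (List.range L).map (fun t => (pf per)^[t] k),
            x < st.1.length := by
          intro x hx
          obtain ⟨t, _, rfl⟩ := List.mem_map.mp hx
          rw [hl1]
          exact iter_lt per n hlen hval k hkN t
        obtain ⟨hflen, hfchar⟩ :=
          foldl_set_char cnt ((List.range L).map (fun t => (pf per)^[t] k)) st.1 hmemxs
        have hmem_iff : ∀ j : Nat, j < per.length →
            (j ∈ (List.range L).map (fun t => (pf per)^[t] k) ↔ Reach per k j) := by
          intro j hj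
          rw [List.mem_map]
          rw [reach_iff_lt per n hlen hnd hval k hkN L hL0 hLle hfix j]
          constructor
          · rintro ⟨t, ht, rfl⟩
            exact ⟨t, List.mem_range.mp ht, rfl⟩
          · rintro ⟨t, ht, rfl⟩
            exact ⟨t, List.mem_range.mpr ht, rfl⟩
        refine ⟨_, rfl, by rw [hflen, hl1], hVlen, ?_, ?_⟩
        · intro j hj
          rw [hVchar j hj, hvis j hj, visB_succ]
        · intro j hj
          rw [hfchar j (by rw [hl1]; exact hj)]
          by_cases hjx : j ∈ (List.range L).map (fun t => (pf per)^[t] k)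
          · have hrj : Reach per k j := (hmem_iff j hj).mp hjx
            have hZ : Zc per white j = Zc per white k :=
              Zc_congr per white n hlen hnd hval k j hkN hrj
            have hvkj : VisB per (k + 1) j = true := by
              rw [visB_succ, Bool.or_eq_true]
              exact Or.inr ((reachB_iff per n hlen hnd hval k hkN j).mpr hrj)
            rw [if_pos hjx, hvkj, if_pos rfl, hcntZ, hZ]
          · have hrj : ¬ Reach per k j := fun h => hjx ((hmem_iff j hj).mpr h)
            have hrb : ReachB per k j = false := by
              by_contra habs
              exact hrj ((reachB_iff per n hlen hnd hval k hkN j).mp (by simpa using habs))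
            rw [if_neg hjx, hres j hj, visB_succ, hrb, Bool.or_false]
  have hN : n.toNat = per.length := by omega
  rw [solve_eq_foldl, ← hlen, Int.toNat_natCast, PySem.List.pyRange_zero_natCast]
  obtain ⟨st, hfold, hl1, hl2, hvis, hres⟩ := key per.length le_rfl
  rw [hfold]
  apply List.ext_getElem (by rw [hl1]; simp)
  intro j h1 h2
  have hjN : j < per.length := by simpa using h2
  have hvj : VisB per per.length j = true :=
    (visB_iff per n hlen hnd hval per.length le_rfl j).mpr ⟨j, hjN, ⟨0, rfl⟩⟩
  rw [List.getElem_map, List.getElem_range, ← List.getD_eq_getElem st.1 0 h1,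
    hres j hjN, hvj, if_pos rfl]

theorem solve_trivial (n : Int) (per : List Int) (white : List String) (h : n ≤ 0) :
    solve n per white = [] := by
  rw [solve_eq_foldl, PySem.List.pyRange_one_eq_nil (by omega)]
  simp [Int.toNat_of_nonpos h]

theorem solve_alt_trivial (n : Int) (per : List Int) (white : List String) (h : n ≤ 0) :
    solve_alt n per white = [] := by
  unfold solve_alt
  rw [PySem.List.pyRange_one_eq_nil (by omega)]
  rfl

-- ===== VERDICT is at the very bottom =====

theorem solve_spec : Claim_equal_solve := by
  intro n per white _ hpre
  unfold Spec_solve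
  rcases hpre with hneg | ⟨hlen, hwlen, hnd, hval⟩
  · rw [solve_trivial n per white hneg, solve_alt_trivial n per white hneg]
  · rw [solve_eq per white n hlen hnd hval, solve_alt_eq per white n hlen hnd hval]
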